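-- pv_equiv track=rewrite | github.com/chaohao2010/ADD-CMAP | ADD_CMAP.py | Array2String
-- ===== SOURCE A (Python) =====
-- def Array2String(array):
-- 	string = ''
-- 	array_sorted = array
-- 	array_sorted.sort()
-- 	array = []
-- 	#delete the same elements
-- 	for i in array_sorted:
-- 		if i not in array:
-- 			array.append(i)
-- 	if len(array) == 0:
-- 		string += 'NONE'
-- 	elif len(array) == 1:
-- 		string += str(array[0])
-- 	else:
-- 		for i in range(len(array)):
-- 			array[i] = int(array[i])
-- 		for i in range(len(array)):
-- 			if i == 0:
-- 				string += str(array[i])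
-- 				if array[i+1] == array[i]+1:
-- 					string += '-'
-- 				else:
-- 					string += ','
-- 			elif i == len(array)-1:
-- 				string += str(array[i])
-- 			else:
-- 				if array[i+1] == array[i]+1:
-- 					if array[i] == array[i-1]+1:
-- 						string += ''
-- 					else:
-- 						string += str(array[i]) + '-'
-- 				else:
-- 					string += str(array[i]) + ','
-- 	return string
-- ===== SOURCE B (Python) =====
-- def Array2String(array):
-- 	# Sorts the argument in place, like the original.
-- 	array.sort()
-- 	if not array:
-- 		return 'NONE'
-- 	runs = []
-- 	start = prev = array[0]
-- 	for x in array[1:]: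
-- 		if x == prev:
-- 			continue
-- 		if x == prev + 1:
-- 			prev = x
-- 		else:
-- 			runs.append((start, prev))
-- 			start = prev = x
-- 	runs.append((start, prev))
-- 	return ','.join(str(a) if a == b else '%d-%d' % (a, b) for a, b in runs)
-- ===== Notes on version B (the rewrite author's own statement) =====
-- stated objective: faster
-- what changed: Replaces A's quadratic membership-test dedup pass plus index-based three-way neighbour formatting with a single linear scan over the sorted list that skips duplicates and groups maximal consecutive runs as (start,end) pairs, then joins the formatted runs.
import Mathlib
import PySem

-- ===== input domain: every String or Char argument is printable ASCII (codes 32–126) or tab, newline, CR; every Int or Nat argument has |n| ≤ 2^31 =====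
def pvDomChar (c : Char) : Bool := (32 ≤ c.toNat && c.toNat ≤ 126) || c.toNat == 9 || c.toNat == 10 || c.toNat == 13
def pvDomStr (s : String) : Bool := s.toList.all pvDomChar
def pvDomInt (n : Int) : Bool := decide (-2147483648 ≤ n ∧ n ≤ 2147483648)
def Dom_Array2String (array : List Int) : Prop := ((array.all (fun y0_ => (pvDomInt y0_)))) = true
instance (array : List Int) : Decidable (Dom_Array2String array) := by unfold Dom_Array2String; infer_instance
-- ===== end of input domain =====

-- B replaces A's quadratic membership-test dedup and index-based neighbour formatting by one
-- linear scan grouping the sorted values into (start,end) runs; both Pythons sort the caller's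
-- list in place, and the equivalence proved here is about the return value.

-- ===== PORT A =====
-- Literal port of A. Notes: `int(array[i])` is the identity on Int values, so the conversion
-- loop is ported as `map (fun x => x)`; all indices i, i+1, i-1 used by A are in range
-- (0 ≤ i < len, i+1 only when i < len-1, i-1 only when i > 0), so pyGetD's default is never read.
def Array2String (array : List Int) : String :=
  let string := ""
  let array_sorted := PySem.List.sorted array (fun x => x) false
  let array := array_sorted.foldl (fun acc i => if acc.contains i then acc else acc ++ [i]) ([] : List Int)
  if PySem.List.len array = 0 then string ++ "NONE"
  else if PySem.List.len array = 1 then string ++ PySem.Int.toStr (PySem.List.pyGetD array 0 0)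
  else
    let array := array.map (fun x => x)
    (PySem.List.pyRange 0 (PySem.List.len array) 1).foldl (fun string i =>
      if i = 0 then
        (string ++ PySem.Int.toStr (PySem.List.pyGetD array i 0)) ++
          (if PySem.List.pyGetD array (i + 1) 0 = PySem.List.pyGetD array i 0 + 1 then "-" else ",")
      else if i = PySem.List.len array - 1 then
        string ++ PySem.Int.toStr (PySem.List.pyGetD array i 0)
      else if PySem.List.pyGetD array (i + 1) 0 = PySem.List.pyGetD array i 0 + 1 then
        if PySem.List.pyGetD array i 0 = PySem.List.pyGetD array (i - 1) 0 + 1 then string ++ ""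
        else (string ++ PySem.Int.toStr (PySem.List.pyGetD array i 0)) ++ "-"
      else (string ++ PySem.Int.toStr (PySem.List.pyGetD array i 0)) ++ ",") string

-- ===== PORT B =====
-- str(a) if a == b else '%d-%d' % (a, b)
def pvFmtRun (r : Int × Int) : String :=
  if r.1 = r.2 then PySem.Int.toStr r.1 else PySem.Int.toStr r.1 ++ "-" ++ PySem.Int.toStr r.2

-- Literal port of B (Source B): sort, then one fold over the tail (array[1:]) with state
-- (runs, start, prev); `match` on the sorted list gives array[0] and array[1:].
def Array2String_alt (array : List Int) : String :=
  match PySem.List.sorted array (fun x => x) false with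
  | [] => "NONE"
  | x :: xs =>
    let st := xs.foldl (fun (st : List (Int × Int) × Int × Int) y =>
        if y = st.2.2 then st
        else if y = st.2.2 + 1 then (st.1, st.2.1, y)
        else (st.1 ++ [(st.2.1, st.2.2)], y, y)) (([] : List (Int × Int)), x, x)
    PySem.Str.join "," ((st.1 ++ [(st.2.1, st.2.2)]).map pvFmtRun)

-- ===== PRECONDITION & SPEC =====
def Spec_Array2String (array : List Int) (out : String) : Prop := out = Array2String_alt array
instance (array : List Int) (out : String) : Decidable (Spec_Array2String array out) := by unfold Spec_Array2String; infer_instance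

-- ===== CLAIM (what is proved, stated in full; the proofs are below) =====
def Claim_equal_Array2String : Prop := ∀ (array : List Int), Dom_Array2String array → Spec_Array2String array (Array2String array)

-- ===== LEMMAS AND PROOFS =====

-- run collector: recursive form of B's fold (skip duplicate, extend run, or close run)
def pvCollect (s p : Int) : List Int → List (Int × Int)
  | [] => [(s, p)]
  | x :: xs => if x = p then pvCollect s p xs
               else if x = p + 1 then pvCollect s x xs
               else (s, p) :: pvCollect x x xs

-- adjacent dedup with known previous element
def pvDedupFrom (p : Int) : List Int → List Int
  | [] => []
  | x :: xs => if x = p then pvDedupFrom p xs else x :: pvDedupFrom x xs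

def pvAdj : List Int → List Int
  | [] => []
  | x :: xs => x :: pvDedupFrom x xs

def pvDedupFrom' : Option Int → List Int → List Int
  | none, xs => pvAdj xs
  | some p, xs => pvDedupFrom p xs

-- the common formatting recursion: prev is the element before the head (only x = prev+1 matters)
def pvG (prev : Int) : List Int → String
  | [] => ""
  | [x] => PySem.Int.toStr x
  | x :: y :: t => (if y = x + 1 then (if x = prev + 1 then "" else PySem.Int.toStr x ++ "-")
                    else PySem.Int.toStr x ++ ",") ++ pvG x (y :: t)

-- A's loop body as a function of the Int index
def pvPieceI (v : List Int) (i : Int) : String :=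
  if i = 0 then
    PySem.Int.toStr (PySem.List.pyGetD v i 0) ++
      (if PySem.List.pyGetD v (i + 1) 0 = PySem.List.pyGetD v i 0 + 1 then "-" else ",")
  else if i = PySem.List.len v - 1 then PySem.Int.toStr (PySem.List.pyGetD v i 0)
  else if PySem.List.pyGetD v (i + 1) 0 = PySem.List.pyGetD v i 0 + 1 then
    (if PySem.List.pyGetD v i 0 = PySem.List.pyGetD v (i - 1) 0 + 1 then ""
     else PySem.Int.toStr (PySem.List.pyGetD v i 0) ++ "-")
  else PySem.Int.toStr (PySem.List.pyGetD v i 0) ++ ","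

-- A's loop body with a Nat index and an explicit `prev` for the i = 0 case
def pvPiece (prev : Int) (v : List Int) (k : Nat) : String :=
  if k = v.length - 1 then PySem.Int.toStr (v.getD k 0)
  else if v.getD (k + 1) 0 = v.getD k 0 + 1 then
    (if v.getD k 0 = (if k = 0 then prev else v.getD (k - 1) 0) + 1 then ""
     else PySem.Int.toStr (v.getD k 0) ++ "-")
  else PySem.Int.toStr (v.getD k 0) ++ ","

def pvCat (l : List String) : String := l.foldr (· ++ ·) ""

theorem pvJoin_step (a b : String) (l : List String) :
    PySem.Str.join "," (a :: b :: l) = a ++ "," ++ PySem.Str.join "," (b :: l) := by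
  apply String.toList_inj.mp
  simp [PySem.Str.toList_join, PySem.Chars.join_cons_cons]

theorem pvJoin_single (a : String) : PySem.Str.join "," [a] = a := by
  apply String.toList_inj.mp
  simp [PySem.Str.toList_join, PySem.Chars.join_singleton]

theorem pvFold_collect (xs : List Int) : ∀ (runs : List (Int × Int)) (s p : Int),
    (fun st : List (Int × Int) × Int × Int => st.1 ++ [(st.2.1, st.2.2)])
      (xs.foldl (fun st y =>
        if y = st.2.2 then st
        else if y = st.2.2 + 1 then (st.1, st.2.1, y)
        else (st.1 ++ [(st.2.1, st.2.2)], y, y)) (runs, s, p))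
    = runs ++ pvCollect s p xs := by
  induction xs with
  | nil => intro runs s p; simp [pvCollect]
  | cons y ys ih =>
    intro runs s p
    simp only [List.foldl_cons, pvCollect]
    by_cases h1 : y = p
    · simp [h1, ih]
    · by_cases h2 : y = p + 1
      · simp [h2, ih]
      · simp [h1, h2, ih]

theorem pvCollect_ne_nil (xs : List Int) (s p : Int) : pvCollect s p xs ≠ [] := by
  induction xs generalizing s p with
  | nil => simp [pvCollect]
  | cons x t ih =>
    simp only [pvCollect]
    split_ifs
    · exact ih s p
    · exact ih s x
    · simp

theorem pvCollect_dedup (xs : List Int) : ∀ (s p : Int),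
    pvCollect s p xs = pvCollect s p (pvDedupFrom p xs) := by
  induction xs with
  | nil => intro s p; rfl
  | cons x t ih =>
    intro s p
    simp only [pvCollect, pvDedupFrom]
    by_cases h1 : x = p
    · simp [h1, ih]
    · by_cases h2 : x = p + 1
      · simp [pvCollect, h2, ih]
      · simp [pvCollect, h1, h2, ih]

theorem pvG_congr (xs : List Int) (x p q : Int) (hp : x ≠ p + 1) (hq : x ≠ q + 1) :
    pvG p (x :: xs) = pvG q (x :: xs) := by
  cases xs with
  | nil => rfl
  | cons y t => simp [pvG, hp, hq]

-- B's joined runs equal the common recursion pvG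
theorem pvJoin_collect (xs : List Int) : ∀ (s p : Int), s ≤ p →
    List.Pairwise (· < ·) (p :: xs) →
    PySem.Str.join "," ((pvCollect s p xs).map pvFmtRun) =
      if s = p then pvG p (p :: xs) else PySem.Int.toStr s ++ "-" ++ pvG (p - 1) (p :: xs) := by
  induction xs with
  | nil =>
    intro s p hsp hpw
    simp only [pvCollect, List.map_cons, List.map_nil, pvJoin_single, pvFmtRun, pvG]
    by_cases h : s = p
    · subst h; simp
    · simp [h]
  | cons x rest ih =>
    intro s p hsp hpw
    have hpx : p < x := (List.pairwise_cons.mp hpw).1 x (by simp)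
    have hpw' : List.Pairwise (· < ·) (x :: rest) := (List.pairwise_cons.mp hpw).2
    have hxp : ¬ (x = p) := by omega
    by_cases hx1 : x = p + 1
    · simp only [pvCollect, if_neg hxp, if_pos hx1]
      rw [ih s x (by omega) hpw']
      rw [if_neg (by omega)]
      have hx1' : x - 1 = p := by omega
      rw [hx1']
      by_cases hsp' : s = p
      · subst hsp'
        simp [pvG, hx1, show ¬ (s = s + 1) by omega, String.append_assoc]
      · simp [pvG, hx1, hsp', String.append_assoc]
    · simp only [pvCollect, if_neg hxp, if_neg hx1]
      obtain ⟨b, l, hb⟩ : ∃ b l, (pvCollect x x rest).map pvFmtRun = b :: l := by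
        cases hc : pvCollect x x rest with
        | nil => exact absurd hc (pvCollect_ne_nil rest x x)
        | cons c cs => exact ⟨pvFmtRun c, cs.map pvFmtRun, by rw [List.map_cons]⟩
      rw [List.map_cons, hb, pvJoin_step, ← hb]
      rw [ih x x (le_refl x) hpw']
      rw [if_pos rfl]
      rw [pvG_congr rest x x p (by omega) (by omega)]
      by_cases hsp' : s = p
      · subst hsp'
        simp [pvG, pvFmtRun, hx1, String.append_assoc]
      · simp [pvG, pvFmtRun, hx1, hsp', String.append_assoc]

theorem pvLast_mem (acc : List Int) (x : Int) (hpw : List.Pairwise (· < ·) acc)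
    (hm : x ∈ acc) (hle : ∀ a ∈ acc, a ≤ x) : acc.getLast? = some x := by
  induction acc with
  | nil => simp at hm
  | cons a rest ih =>
    cases rest with
    | nil => simp at hm; simp [hm]
    | cons r rs =>
      have har : a < r := (List.pairwise_cons.mp hpw).1 r (by simp)
      have hx : x ∈ r :: rs := by
        rcases List.mem_cons.mp hm with h | h
        · exfalso
          have := hle r (by simp)
          omega
        · exact h
      rw [List.getLast?_cons_cons]
      exact ih (List.pairwise_cons.mp hpw).2 hx (fun a ha => hle a (List.mem_cons_of_mem _ ha))

-- A's membership dedup of a sorted list is adjacent dedup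
theorem pvFold_dedup (xs : List Int) : ∀ (acc : List Int), List.Pairwise (· < ·) acc →
    List.Pairwise (· ≤ ·) xs → (∀ a ∈ acc, ∀ b ∈ xs, a ≤ b) →
    xs.foldl (fun acc i => if acc.contains i then acc else acc ++ [i]) acc
      = acc ++ pvDedupFrom' acc.getLast? xs := by
  induction xs with
  | nil =>
    intro acc _ _ _
    cases acc.getLast? <;> simp [pvDedupFrom', pvAdj, pvDedupFrom]
  | cons x t ih =>
    intro acc hacc hpw hle
    have hhd : ∀ b ∈ t, x ≤ b := (List.pairwise_cons.mp hpw).1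
    have hpt : List.Pairwise (· ≤ ·) t := (List.pairwise_cons.mp hpw).2
    simp only [List.foldl_cons]
    by_cases hm : x ∈ acc
    · have hlast : acc.getLast? = some x :=
        pvLast_mem acc x hacc hm (fun a ha => hle a ha x (by simp))
      rw [if_pos (by simp [List.contains_eq_mem, hm])]
      rw [ih acc hacc hpt (fun a ha b hb => hle a ha b (List.mem_cons_of_mem _ hb))]
      rw [hlast]
      simp [pvDedupFrom', pvDedupFrom]
    · rw [if_neg (by simp [List.contains_eq_mem, hm])]
      have hax : ∀ a ∈ acc, a < x := fun a ha =>
        lt_of_le_of_ne (hle a ha x (by simp)) (fun he => hm (he ▸ ha))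
      have hacc' : List.Pairwise (· < ·) (acc ++ [x]) := by
        rw [List.pairwise_append]
        exact ⟨hacc, by simp, by simpa using hax⟩
      have hle' : ∀ a ∈ acc ++ [x], ∀ b ∈ t, a ≤ b := by
        intro a ha b hb
        rcases List.mem_append.mp ha with h | h
        · exact hle a h b (List.mem_cons_of_mem _ hb)
        · simp at h; exact h ▸ hhd b hb
      rw [ih (acc ++ [x]) hacc' hpt hle']
      rw [List.getLast?_concat]
      cases hc : acc.getLast? with
      | none =>
        have : acc = [] := by
          cases acc with
          | nil => rfl
          | cons a r => simp [List.getLast?_cons] at hc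
        simp [this, pvDedupFrom', pvAdj]
      | some p =>
        have hpmem : p ∈ acc := List.mem_of_getLast? hc
        have hpx : p ≠ x := fun he => hm (he ▸ hpmem)
        simp only [pvDedupFrom', pvDedupFrom]
        simp
        intro he; exact absurd he.symm hpx

theorem pvDedupFrom_lt (xs : List Int) : ∀ (p : Int), (∀ b ∈ xs, p ≤ b) →
    List.Pairwise (· ≤ ·) xs →
    (∀ b ∈ pvDedupFrom p xs, p < b) ∧ List.Pairwise (· < ·) (pvDedupFrom p xs) := by
  induction xs with
  | nil => intro p _ _; simp [pvDedupFrom]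
  | cons x t ih =>
    intro p hle hpw
    have hx : x = x := rfl
    have hhd : ∀ b ∈ t, x ≤ b := (List.pairwise_cons.mp hpw).1
    have hpt : List.Pairwise (· ≤ ·) t := (List.pairwise_cons.mp hpw).2
    by_cases h : x = p
    · simp only [pvDedupFrom, if_pos h]
      exact ih p (fun b hb => h ▸ hhd b hb) hpt
    · have hpx : p < x := lt_of_le_of_ne (hle x (by simp)) (fun he => h he.symm)
      simp only [pvDedupFrom, if_neg h]
      obtain ⟨h1, h2⟩ := ih x hhd hpt
      constructor
      · intro b hb
        rcases List.mem_cons.mp hb with h' | h'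
        · omega
        · exact lt_trans hpx (h1 b h')
      · exact List.pairwise_cons.mpr ⟨h1, h2⟩

-- shift: A's Nat-indexed piece over x :: v' at k+1 is the piece over v' at k with prev = x
theorem pvPiece_shift (v' : List Int) (x prev : Int) (k : Nat) (hk : k < v'.length) :
    pvPiece prev (x :: v') (k + 1) = pvPiece x v' k := by
  simp only [pvPiece, List.length_cons, Nat.add_sub_cancel, List.getD_cons_succ]
  have hc1 : (k + 1 = v'.length) ↔ (k = v'.length - 1) := by omega
  simp only [hc1, Nat.succ_ne_zero, if_false]
  cases k with
  | zero => simp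
  | succ j => simp

theorem pvPieceI_eq (v : List Int) (k : Nat) (hlen : 2 ≤ v.length) (hk : k < v.length) :
    pvPieceI v (k : Int) = pvPiece (v.getD 0 0) v k := by
  have h1 : ((k : Int) + 1) = ((k + 1 : Nat) : Int) := by push_cast; ring
  have h2 : PySem.List.pyGetD v ((k : Int)) 0 = v.getD k 0 := PySem.List.pyGetD_natCast v k 0
  have h3 : PySem.List.pyGetD v ((k : Int) + 1) 0 = v.getD (k + 1) 0 := by
    rw [h1, PySem.List.pyGetD_natCast]
  have hlenc : (PySem.List.len v : Int) - 1 = ((v.length : Int) - 1) := by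
    simp [PySem.List.len_eq]
  by_cases hk0 : k = 0
  · subst hk0
    have hnl : ¬ ((0 : Nat) = v.length - 1) := by omega
    have hfalse : ¬ (v.getD 0 0 = v.getD 0 0 + 1) := by omega
    simp only [Int.natCast_zero] at h2 h3
    have h3' : PySem.List.pyGetD v 1 0 = v.getD 1 0 := by simpa using h3
    simp [pvPieceI, pvPiece, h2, h3', hnl]
    split_ifs <;> simp
  · have hki : ¬ ((k : Int) = 0) := by exact_mod_cast hk0
    have hlast : ((k : Int) = PySem.List.len v - 1) ↔ (k = v.length - 1) := by
      simp only [PySem.List.len_eq]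
      omega
    have h4 : PySem.List.pyGetD v ((k : Int) - 1) 0 = v.getD (k - 1) 0 := by
      have : ((k : Int) - 1) = ((k - 1 : Nat) : Int) := by omega
      rw [this, PySem.List.pyGetD_natCast]
    simp only [pvPieceI, pvPiece, h2, h3, h4, if_neg hki, if_neg hk0, hlast]

theorem pvFoldl_append (l : List Int) (f : Int → String) : ∀ (init : String),
    l.foldl (fun s x => s ++ f x) init = init ++ pvCat (l.map f) := by
  induction l with
  | nil => intro init; simp [pvCat]
  | cons x t ih =>
    intro init
    simp only [List.foldl_cons, List.map_cons, pvCat, List.foldr_cons]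
    rw [ih (init ++ f x)]
    simp [pvCat, String.append_assoc]

-- A's concatenated pieces equal the common recursion pvG
theorem pvCat_pieces (v : List Int) : ∀ (prev : Int),
    pvCat ((List.range v.length).map (pvPiece prev v)) = pvG prev v := by
  induction v with
  | nil => intro prev; simp [pvCat, pvG]
  | cons x v' ih =>
    intro prev
    rw [List.length_cons, List.range_succ_eq_map, List.map_cons, List.map_map]
    have hmap : List.map (pvPiece prev (x :: v') ∘ Nat.succ) (List.range v'.length)
        = List.map (pvPiece x v') (List.range v'.length) := by
      apply List.map_congr_left
      intro k hk
      exact pvPiece_shift v' x prev k (List.mem_range.mp hk)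
    rw [hmap]
    cases v' with
    | nil => simp [pvCat, pvPiece, pvG]
    | cons y t =>
      simp only [pvCat, List.foldr_cons]
      rw [show List.foldr (· ++ ·) "" (List.map (pvPiece x (y :: t)) (List.range (y :: t).length)) = pvCat (List.map (pvPiece x (y :: t)) (List.range (y :: t).length)) from rfl]
      rw [ih x]
      simp only [pvG, pvPiece, List.length_cons, List.getD_cons_succ, List.getD_cons_zero]
      have : ¬ (0 = t.length + 1 + 1 - 1) := by omega
      rw [if_neg this]
      simp

-- ===== VERDICT (by name: the statement is the Claim_ definition above) =====
theorem Array2String_spec : Claim_equal_Array2String := by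
  intro array _
  unfold Spec_Array2String Array2String Array2String_alt
  simp only []
  have hpw : List.Pairwise (· ≤ ·) (PySem.List.sorted array (fun x => x) false) :=
    PySem.List.sorted_pairwise array (fun x => x)
  cases hsl : PySem.List.sorted array (fun x => x) false with
  | nil =>
    simp [PySem.List.len_eq]
  | cons x ys =>
    rw [hsl] at hpw
    have hx_le : ∀ b ∈ ys, x ≤ b := (List.pairwise_cons.mp hpw).1
    have hpt : List.Pairwise (· ≤ ·) ys := (List.pairwise_cons.mp hpw).2
    have hdd : (x :: ys).foldl (fun acc i => if acc.contains i then acc else acc ++ [i]) ([] : List Int)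
        = x :: pvDedupFrom x ys := by
      have h := pvFold_dedup (x :: ys) [] (by simp) hpw (by simp)
      simpa [pvDedupFrom', pvAdj] using h
    rw [hdd]
    dsimp only
    have hcol := pvFold_collect ys ([] : List (Int × Int)) x x
    simp only [List.nil_append] at hcol
    rw [hcol, pvCollect_dedup ys x x]
    obtain ⟨hlt, hpwd⟩ := pvDedupFrom_lt ys x hx_le hpt
    have hpwx : List.Pairwise (· < ·) (x :: pvDedupFrom x ys) :=
      List.pairwise_cons.mpr ⟨hlt, hpwd⟩
    rw [pvJoin_collect (pvDedupFrom x ys) x x (le_refl x) hpwx, if_pos rfl]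
    cases hd : pvDedupFrom x ys with
    | nil =>
      simp [PySem.List.len_eq, pvG, PySem.List.pyGetD_zero_cons]
    | cons y t =>
      rw [hd] at hpwx
      have hlen2 : 2 ≤ (x :: y :: t).length := by simp
      have hne0 : ¬ (PySem.List.len (x :: y :: t) = 0) := by
        simp [PySem.List.len_eq]
        omega
      have hne1 : ¬ (PySem.List.len (x :: y :: t) = 1) := by
        simp [PySem.List.len_eq]
        omega
      rw [if_neg hne0, if_neg hne1]
      simp only [List.map_id']
      have hbody : (fun (string : String) (i : Int) =>
          if i = 0 then
            (string ++ PySem.Int.toStr (PySem.List.pyGetD (x :: y :: t) i 0)) ++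
              (if PySem.List.pyGetD (x :: y :: t) (i + 1) 0 = PySem.List.pyGetD (x :: y :: t) i 0 + 1 then "-" else ",")
          else if i = PySem.List.len (x :: y :: t) - 1 then
            string ++ PySem.Int.toStr (PySem.List.pyGetD (x :: y :: t) i 0)
          else if PySem.List.pyGetD (x :: y :: t) (i + 1) 0 = PySem.List.pyGetD (x :: y :: t) i 0 + 1 then
            if PySem.List.pyGetD (x :: y :: t) i 0 = PySem.List.pyGetD (x :: y :: t) (i - 1) 0 + 1 then string ++ ""
            else (string ++ PySem.Int.toStr (PySem.List.pyGetD (x :: y :: t) i 0)) ++ "-"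
          else (string ++ PySem.Int.toStr (PySem.List.pyGetD (x :: y :: t) i 0)) ++ ",")
          = fun (s : String) (i : Int) => s ++ pvPieceI (x :: y :: t) i := by
        funext s i
        simp only [pvPieceI]
        split_ifs <;> simp [String.append_assoc]
      rw [hbody, pvFoldl_append, String.empty_append]
      rw [PySem.List.pyRange_one]
      have htn : ((PySem.List.len (x :: y :: t) - 0).toNat) = (x :: y :: t).length := by
        simp [PySem.List.len_eq]
        omega
      rw [htn, List.map_map]
      have hmap : List.map (pvPieceI (x :: y :: t) ∘ fun k : Nat => (0 : Int) + ↑k) (List.range (x :: y :: t).length)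
          = List.map (pvPiece ((x :: y :: t).getD 0 0) (x :: y :: t)) (List.range (x :: y :: t).length) := by
        apply List.map_congr_left
        intro k hk
        have : (0 : Int) + (k : Int) = (k : Int) := by ring
        simp only [Function.comp, this]
        exact pvPieceI_eq (x :: y :: t) k hlen2 (List.mem_range.mp hk)
      rw [hmap, pvCat_pieces]
      simp [pvG]
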